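-- pv_equiv track=rewrite | github.com/vladmutu/SentinelFlow-BE | app/services/package_fetcher.py | _is_single_transposition
-- ===== SOURCE A (Python) =====
-- def _is_single_transposition(a: str, b: str) -> bool:
--     if len(a) != len(b):
--         return False
--     mismatches = [idx for idx, (x, y) in enumerate(zip(a, b)) if x != y]
--     if len(mismatches) != 2:
--         return False
--     i, j = mismatches
--     return a[i] == b[j] and a[j] == b[i]
-- ===== SOURCE B (Python) =====
-- def _is_single_transposition(a: str, b: str) -> bool:
--     if len(a) != len(b):
--         return False
--     lo, hi = 0, len(a) - 1
--     while lo <= hi and a[lo] == b[lo]: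
--         lo += 1
--     while hi > lo and a[hi] == b[hi]:
--         hi -= 1
--     return lo < hi and a[lo] == b[hi] and a[hi] == b[lo] and a[lo + 1:hi] == b[lo + 1:hi]
-- ===== Notes on version B (the rewrite author's own statement) =====
-- stated objective: faster
-- what changed: Replaces building the full mismatch-index list (enumerate+zip+filter) with two pointers that strip the common prefix and suffix and then compare the two boundary characters and the interior slice, exiting early.
import Mathlib
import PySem

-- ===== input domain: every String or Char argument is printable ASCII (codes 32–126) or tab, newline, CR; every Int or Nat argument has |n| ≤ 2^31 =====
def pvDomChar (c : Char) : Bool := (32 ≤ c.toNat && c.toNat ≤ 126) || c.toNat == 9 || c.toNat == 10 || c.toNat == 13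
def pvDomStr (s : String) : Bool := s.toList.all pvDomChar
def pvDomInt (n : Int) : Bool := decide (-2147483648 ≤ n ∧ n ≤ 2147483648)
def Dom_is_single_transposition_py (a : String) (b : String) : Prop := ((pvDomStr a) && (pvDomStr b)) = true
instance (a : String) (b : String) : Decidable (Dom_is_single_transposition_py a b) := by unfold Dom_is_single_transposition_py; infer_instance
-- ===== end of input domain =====

-- B replaces A's full mismatch-index list (enumerate+zip+filter) with two pointers stripping
-- the common prefix/suffix and comparing the boundary characters and the interior slice.

-- ===== PORT A =====
-- mismatches = [idx for idx, (x, y) in enumerate(zip(a, b)) if x != y]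
def mismA (u v : List Char) : List Int :=
  ((PySem.List.enumerate (u.zip v) 0).filter (fun p => decide (p.2.1 ≠ p.2.2))).map (·.1)

def coreA (u v : List Char) : Bool :=
  let mismatches := mismA u v
  if mismatches.length ≠ 2 then false
  else
    match mismatches with
    | [i, j] =>
      decide (PySem.List.pyGet? u i = PySem.List.pyGet? v j) &&
      decide (PySem.List.pyGet? u j = PySem.List.pyGet? v i)
    | _ => false

def is_single_transposition_py (a : String) (b : String) : Bool :=
  if PySem.Str.len a ≠ PySem.Str.len b then false
  else coreA a.toList b.toList

-- ===== PORT B =====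
-- the `while … and a[k]==b[k]` pointer advance, as structural recursion on the char lists
def stripCommon : List Char → List Char → List Char × List Char
  | x :: xs, y :: ys => if x = y then stripCommon xs ys else (x :: xs, y :: ys)
  | xs, ys => (xs, ys)

def coreB (u v : List Char) : Bool :=
  match stripCommon u v with                      -- advance lo to the first mismatch
  | (x :: xs, y :: ys) =>
    match stripCommon xs.reverse ys.reverse with  -- retreat hi to the last mismatch
    | (p :: ps, q :: qs) =>
      -- lo < hi; a[lo]==b[hi] and a[hi]==b[lo] and a[lo+1:hi]==b[lo+1:hi]
      decide (x = q ∧ p = y ∧ ps = qs)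
    | _ => false                                  -- hi descended to lo: no second mismatch
  | _ => false                                    -- no mismatch at all

def is_single_transposition_py_alt (a : String) (b : String) : Bool :=
  if PySem.Str.len a ≠ PySem.Str.len b then false
  else coreB a.toList b.toList

-- ===== PRECONDITION & SPEC =====
def Spec_is_single_transposition_py (a : String) (b : String) (out : Bool) : Prop := out = is_single_transposition_py_alt a b
instance (a : String) (b : String) (out : Bool) : Decidable (Spec_is_single_transposition_py a b out) := by unfold Spec_is_single_transposition_py; infer_instance

-- ===== CLAIM (what is proved, stated in full; the proofs are below) =====
def Claim_equal_is_single_transposition_py : Prop := ∀ (a : String) (b : String), Dom_is_single_transposition_py a b → Spec_is_single_transposition_py a b (is_single_transposition_py a b)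

-- ===== LEMMAS AND PROOFS =====

-- Nat-indexed recursive characterisation of A's mismatch-index list
def mrecN : List Char → List Char → List Nat
  | x :: u, y :: v => if x = y then (mrecN u v).map (· + 1) else 0 :: (mrecN u v).map (· + 1)
  | _, _ => []

-- the two matches of coreA / coreB after the first mismatch, as named functions
def lhsFun (u v : List Char) (x y : Char) : Bool :=
  match mrecN u v with
  | [n] => decide (some x = v[n]? ∧ u[n]? = some y)
  | _ => false

def rhsFun (u v : List Char) (x y : Char) : Bool :=
  match stripCommon u.reverse v.reverse with
  | (p :: ps, q :: qs) => decide (x = q ∧ p = y ∧ ps = qs)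
  | _ => false

theorem mismA_gen (u v : List Char) (s : Int) :
    ((PySem.List.enumerate (u.zip v) s).filter (fun p => decide (p.2.1 ≠ p.2.2))).map (·.1)
      = (mrecN u v).map (fun n : Nat => s + (n : Int)) := by
  induction u generalizing v s with
  | nil => simp [mrecN]
  | cons x u ih =>
    cases v with
    | nil => simp [mrecN]
    | cons y v =>
      have ih' := ih v (s + 1)
      by_cases hxy : x = y
      · subst hxy
        simp only [List.zip_cons_cons, PySem.List.enumerate_cons, List.filter_cons]
        rw [if_neg (by simp), ih']
        simp [mrecN, List.map_map, Function.comp_def]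
        exact fun n _ => by ring
      · simp only [List.zip_cons_cons, PySem.List.enumerate_cons, List.filter_cons]
        rw [if_pos (by simp [hxy]), List.map_cons, ih']
        simp [mrecN, hxy, List.map_map, Function.comp_def]
        exact fun n _ => by ring

theorem mismA_eq (u v : List Char) : mismA u v = (mrecN u v).map (fun n : Nat => (n : Int)) := by
  have h := mismA_gen u v 0
  simpa [mismA] using h

theorem mrecN_lt : ∀ u v : List Char, ∀ n ∈ mrecN u v, n < u.length ∧ n < v.length := by
  intro u
  induction u with
  | nil => intro v n h; simp [mrecN] at h
  | cons x u ih =>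
    intro v n h
    cases v with
    | nil => simp [mrecN] at h
    | cons y v =>
      by_cases hxy : x = y
      · simp only [mrecN, if_pos hxy, List.mem_map] at h
        obtain ⟨m, hm, rfl⟩ := h
        have := ih v m hm
        simp; omega
      · simp only [mrecN, if_neg hxy, List.mem_cons, List.mem_map] at h
        rcases h with rfl | ⟨m, hm, rfl⟩
        · simp
        · have := ih v m hm
          simp; omega

theorem mrecN_nil_iff : ∀ u v : List Char, u.length = v.length → (mrecN u v = [] ↔ u = v) := by
  intro u
  induction u with
  | nil => intro v h; simp at h; simp [mrecN, (List.length_eq_zero_iff.mp h.symm)]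
  | cons x u ih =>
    intro v h
    cases v with
    | nil => simp at h
    | cons y v =>
      simp only [List.length_cons, Nat.add_right_cancel_iff] at h
      by_cases hxy : x = y
      · simp [mrecN, hxy, ih v h]
      · simp [mrecN, hxy]

theorem mrecN_concat : ∀ us vs : List Char, ∀ c d : Char, us.length = vs.length →
    mrecN (us ++ [c]) (vs ++ [d])
      = if c = d then mrecN us vs else mrecN us vs ++ [us.length] := by
  intro us
  induction us with
  | nil =>
    intro vs c d h
    simp at h
    obtain rfl : vs = [] := List.length_eq_zero_iff.mp h.symm
    by_cases hcd : c = d <;> simp [mrecN, hcd]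
  | cons x us ih =>
    intro vs c d h
    cases vs with
    | nil => simp at h
    | cons y vs =>
      simp only [List.length_cons, Nat.add_right_cancel_iff] at h
      simp only [List.cons_append, mrecN, ih vs c d h]
      by_cases hcd : c = d <;> by_cases hxy : x = y <;> simp [hcd, hxy]

theorem tailCase : ∀ u v : List Char, ∀ x y : Char, u.length = v.length →
    lhsFun u v x y = rhsFun u v x y := by
  intro u
  induction u using List.reverseRecOn with
  | nil =>
    intro v x y h
    simp at h
    obtain rfl : v = [] := List.length_eq_zero_iff.mp h.symm
    simp [lhsFun, rhsFun, mrecN, stripCommon]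
  | append_singleton us c ih =>
    intro v x y h
    rcases List.eq_nil_or_concat v with rfl | ⟨vs, d, rfl⟩
    · simp at h
    · simp only [List.concat_eq_append] at h ⊢
      have hl : us.length = vs.length := by simp at h; omega
      by_cases hcd : c = d
      · subst hcd
        have hm : mrecN (us ++ [c]) (vs ++ [c]) = mrecN us vs := by
          simp [mrecN_concat us vs c c hl]
        have hr : rhsFun (us ++ [c]) (vs ++ [c]) x y = rhsFun us vs x y := by
          unfold rhsFun
          simp [stripCommon]
        rw [hr, ← ih vs x y hl]
        unfold lhsFun
        rw [hm]
        cases hms : mrecN us vs with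
        | nil => rfl
        | cons n ms =>
          cases ms with
          | cons m ms' => rfl
          | nil =>
            have hn := mrecN_lt us vs n (by rw [hms]; simp)
            simp only [List.getElem?_append_left hn.1, List.getElem?_append_left hn.2]
      · have hm : mrecN (us ++ [c]) (vs ++ [d]) = mrecN us vs ++ [us.length] := by
          simp [mrecN_concat us vs c d hl, hcd]
        have hr : rhsFun (us ++ [c]) (vs ++ [d]) x y
            = decide (x = d ∧ c = y ∧ us = vs) := by
          unfold rhsFun
          simp [stripCommon, hcd]
        rw [hr]
        unfold lhsFun
        rw [hm]
        cases hms : mrecN us vs with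
        | nil =>
          have huv : us = vs := (mrecN_nil_iff us vs hl).mp hms
          subst huv
          simp
        | cons n ms =>
          have huv : us ≠ vs := fun he => by
            rw [(mrecN_nil_iff us vs hl).mpr he] at hms; simp at hms
          cases ms <;> simp [huv]

theorem stripCommon_cons_eq (x : Char) (xs ys : List Char) :
    stripCommon (x :: xs) (x :: ys) = stripCommon xs ys := by
  simp [stripCommon]

theorem coreA_cons_eq (x : Char) (u v : List Char) : coreA (x :: u) (x :: v) = coreA u v := by
  unfold coreA
  rw [mismA_eq, mismA_eq]
  simp only [mrecN]
  cases hms : mrecN u v with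
  | nil => rfl
  | cons n ms =>
    cases ms with
    | nil => rfl
    | cons m ms' =>
      cases ms' with
      | cons k ks => rfl
      | nil => simp [PySem.List.pyGet?_natCast]

theorem coreA_mismatch (x y : Char) (u v : List Char) (hxy : x ≠ y) :
    coreA (x :: u) (y :: v) = lhsFun u v x y := by
  unfold coreA lhsFun
  rw [mismA_eq]
  simp only [mrecN, if_neg hxy]
  cases hms : mrecN u v with
  | nil => rfl
  | cons n ms =>
    cases ms with
    | cons m ms' => rfl
    | nil =>
      simp [PySem.List.pyGet?_natCast, Bool.decide_and]

theorem coreB_mismatch (x y : Char) (u v : List Char) (hxy : x ≠ y) :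
    coreB (x :: u) (y :: v) = rhsFun u v x y := by
  unfold coreB rhsFun
  simp [stripCommon, hxy]

theorem core_eq (u : List Char) : ∀ v : List Char, u.length = v.length → coreA u v = coreB u v := by
  induction u with
  | nil =>
    intro v h
    simp at h
    obtain rfl : v = [] := List.length_eq_zero_iff.mp h.symm
    rfl
  | cons x u ih =>
    intro v h
    cases v with
    | nil => simp at h
    | cons y v =>
      simp only [List.length_cons, Nat.add_right_cancel_iff] at h
      by_cases hxy : x = y
      · subst hxy
        rw [coreA_cons_eq]
        have : coreB (x :: u) (x :: v) = coreB u v := by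
          unfold coreB
          rw [stripCommon_cons_eq]
        rw [this]
        exact ih v h
      · rw [coreA_mismatch x y u v hxy, coreB_mismatch x y u v hxy]
        exact tailCase u v x y h

-- ===== VERDICT (by name: the statement is the Claim_ definition above) =====
theorem is_single_transposition_py_spec : Claim_equal_is_single_transposition_py := by
  intro a b _
  unfold Spec_is_single_transposition_py is_single_transposition_py is_single_transposition_py_alt
  by_cases h : PySem.Str.len a = PySem.Str.len b
  · rw [if_neg (by simpa using h), if_neg (by simpa using h)]
    apply core_eq
    simpa using h
  · rw [if_pos (by simpa using h), if_pos (by simpa using h)]
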